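-- pv_equiv track=rewrite | github.com/akikuno/DAJIN2 | src/DAJIN2/utils/cssplits_handler.py | get_flanked_tags_by_deletions
-- ===== SOURCE A (Python) =====
-- def get_flanked_tags_by_deletions(midsv_tags: list[str]) -> tuple[list[list[str]], list[tuple[int, int]]]:
--     """
--     Extracts index and midsv tags flanked by large deletions.
--     """
--     flanked_tags = []
--     flanked_indices = []
--     i = 0
--     while i < len(midsv_tags):
--         tag = midsv_tags[i]
--         flanked_tag = []
--
--         # Flag indicating whether it is flanked until the next Del_Allele appears
--         is_flanked = False
--
--         if tag.endswith("!END_OF_DEL_ALLELE!") and i < len(midsv_tags) - 1: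
--             i += 1
--             start_index = i
--             while i < len(midsv_tags):
--                 if midsv_tags[i].startswith("!START_OF_DEL_ALLELE!"):
--                     is_flanked = True
--                     break
--                 flanked_tag.append(midsv_tags[i])
--                 i += 1
--
--         if flanked_tag and is_flanked:
--             flanked_tags.append(flanked_tag)
--             end_index = i
--             flanked_indices.append((start_index, end_index))
--
--         i += 1
--
--     return flanked_tags, flanked_indices
-- ===== SOURCE B (Python) =====
-- def get_flanked_tags_by_deletions(midsv_tags: list[str]) -> tuple[list[list[str]], list[tuple[int, int]]]:
--     """
--     Extracts index and midsv tags flanked by large deletions.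
--     Two-pass version: precompute the marker positions, then match them
--     with a cursor instead of rescanning the tag list.
--     """
--     n = len(midsv_tags)
--     end_positions = [i for i in range(n - 1) if midsv_tags[i].endswith("!END_OF_DEL_ALLELE!")]
--     start_positions = [i for i in range(n) if midsv_tags[i].startswith("!START_OF_DEL_ALLELE!")]
--
--     flanked_tags = []
--     flanked_indices = []
--     pos = 0  # first index not yet consumed
--     j = 0    # pointer into start_positions
--     for e in end_positions:
--         if e < pos:
--             continue
--         while j < len(start_positions) and start_positions[j] <= e:
--             j += 1
--         if j == len(start_positions):
--             break  # no START after this END: the rest is unflanked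
--         s = start_positions[j]
--         pos = s + 1
--         if s > e + 1:
--             flanked_tags.append(midsv_tags[e + 1 : s])
--             flanked_indices.append((e + 1, s))
--     return flanked_tags, flanked_indices
-- ===== Notes on version B (the rewrite author's own statement) =====
-- stated objective: alternative
-- what changed: Replaces the single nested index-walking while-loop with a two-pass scheme: precompute the lists of END and START marker positions, then pair them greedily with a cursor and a monotone pointer into the start-position list, slicing each flanked segment out directly.
import Mathlib
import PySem

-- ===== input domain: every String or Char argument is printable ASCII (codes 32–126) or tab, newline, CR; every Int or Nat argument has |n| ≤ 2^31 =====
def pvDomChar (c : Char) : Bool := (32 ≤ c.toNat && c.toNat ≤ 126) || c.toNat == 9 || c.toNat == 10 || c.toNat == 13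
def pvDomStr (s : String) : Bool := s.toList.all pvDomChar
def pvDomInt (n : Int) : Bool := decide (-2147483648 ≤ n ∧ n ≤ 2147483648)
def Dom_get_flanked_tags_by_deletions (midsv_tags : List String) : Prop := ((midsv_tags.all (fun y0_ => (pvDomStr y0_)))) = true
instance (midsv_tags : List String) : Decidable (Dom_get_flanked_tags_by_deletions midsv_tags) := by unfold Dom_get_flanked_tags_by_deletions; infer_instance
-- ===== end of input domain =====

-- B replaces A's nested index-walking while-loop by precomputing the END/START marker
-- positions and pairing them with a cursor (objective: alternative decomposition).

-- ===== PORT A =====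
-- inner while loop: from index i, collect tags until one starts with the START marker
def pvInnerA (tags : List String) (i : Nat) : List String × Nat × Bool :=
  if h : i < tags.length then
    if PySem.Str.startswith tags[i] "!START_OF_DEL_ALLELE!" then
      ([], i, true)
    else
      let r := pvInnerA tags (i + 1)
      (tags[i] :: r.1, r.2)
  else ([], i, false)
termination_by tags.length - i

-- needed for pvOuterA's termination (cited in decreasing_by)
theorem pvInnerA_le (tags : List String) : ∀ m i, tags.length - i ≤ m → i ≤ (pvInnerA tags i).2.1 := by
  intro m
  induction m with
  | zero =>
    intro i h
    rw [pvInnerA]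
    have hn : ¬ i < tags.length := by omega
    simp [hn]
  | succ m ih =>
    intro i h
    rw [pvInnerA]
    split
    · split
      · simp
      · have := ih (i + 1) (by omega)
        exact le_trans (Nat.le_succ i) this
    · simp

-- outer while loop of A
def pvOuterA (tags : List String) (i : Nat) : List (List String) × List (Int × Int) :=
  if h : i < tags.length then
    if PySem.Str.endswith tags[i] "!END_OF_DEL_ALLELE!" = true ∧ i < tags.length - 1 then
      let inner := pvInnerA tags (i + 1)
      let rest := pvOuterA tags (inner.2.1 + 1)
      if inner.1 ≠ [] ∧ inner.2.2 = true then
        (inner.1 :: rest.1, (((i + 1 : Nat) : Int), ((inner.2.1 : Nat) : Int)) :: rest.2)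
      else rest
    else pvOuterA tags (i + 1)
  else ([], [])
termination_by tags.length - i
decreasing_by
  · have := pvInnerA_le tags (tags.length - (i + 1)) (i + 1) (by omega); omega
  · omega

def get_flanked_tags_by_deletions (midsv_tags : List String) : List (List String) × (List (Int × Int)) :=
  pvOuterA midsv_tags 0

-- ===== PORT B =====
-- the inner 'while j < len(start_positions) and start_positions[j] <= e: j += 1'
def pvSkipLe (starts : List Nat) (e : Nat) : List Nat :=
  match starts with
  | [] => []
  | s :: rest => if s ≤ e then pvSkipLe rest e else s :: rest

-- the 'for e in end_positions' loop with cursor pos and start-pointer (the unconsumed suffix of start_positions)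
def pvBLoop (tags : List String) (ends : List Nat) (starts : List Nat) (pos : Nat) :
    List (List String) × List (Int × Int) :=
  match ends with
  | [] => ([], [])
  | e :: rest =>
    if e < pos then pvBLoop tags rest starts pos
    else
      match pvSkipLe starts e with
      | [] => ([], [])
      | s :: starts' =>
        let r := pvBLoop tags rest (s :: starts') (s + 1)
        if e + 1 < s then
          (PySem.List.slice tags (some ((e : Int) + 1)) (some (s : Int)) :: r.1,
            ((e : Int) + 1, (s : Int)) :: r.2)
        else r

def pvEnds (tags : List String) : List Nat :=
  (List.range (tags.length - 1)).filter
    (fun i => PySem.Str.endswith (tags.getD i "") "!END_OF_DEL_ALLELE!")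

def pvStarts (tags : List String) : List Nat :=
  (List.range tags.length).filter
    (fun i => PySem.Str.startswith (tags.getD i "") "!START_OF_DEL_ALLELE!")

def get_flanked_tags_by_deletions_alt (midsv_tags : List String) : List (List String) × (List (Int × Int)) :=
  pvBLoop midsv_tags (pvEnds midsv_tags) (pvStarts midsv_tags) 0

-- ===== PRECONDITION & SPEC =====
def Spec_get_flanked_tags_by_deletions (midsv_tags : List String) (out : List (List String) × (List (Int × Int))) : Prop := out = get_flanked_tags_by_deletions_alt midsv_tags
instance (midsv_tags : List String) (out : List (List String) × (List (Int × Int))) : Decidable (Spec_get_flanked_tags_by_deletions midsv_tags out) := by unfold Spec_get_flanked_tags_by_deletions; infer_instance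

-- ===== CLAIM (what is proved, stated in full; the proofs are below) =====
def Claim_equal_get_flanked_tags_by_deletions : Prop := ∀ (midsv_tags : List String), Dom_get_flanked_tags_by_deletions midsv_tags → Spec_get_flanked_tags_by_deletions midsv_tags (get_flanked_tags_by_deletions midsv_tags)

-- ===== LEMMAS AND PROOFS =====

theorem pvSkipLe_cons (a : Nat) (rest : List Nat) (e : Nat) :
    pvSkipLe (a :: rest) e = if a ≤ e then pvSkipLe rest e else a :: rest := rfl

theorem pvSkipLe_head_gt (l : List Nat) (e s : Nat) (rest' : List Nat)
    (h : pvSkipLe l e = s :: rest') : e < s := by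
  induction l with
  | nil => simp [pvSkipLe] at h
  | cons a t ih =>
    rw [pvSkipLe_cons] at h
    by_cases ha : a ≤ e
    · rw [if_pos ha] at h; exact ih h
    · rw [if_neg ha] at h
      injection h with h1 _
      omega

theorem pvBLoop_nil (tags : List String) (starts : List Nat) (pos : Nat) :
    pvBLoop tags [] starts pos = ([], []) := rfl

theorem pvBLoop_cons (tags : List String) (e : Nat) (rest starts : List Nat) (pos : Nat) :
    pvBLoop tags (e :: rest) starts pos =
      if e < pos then pvBLoop tags rest starts pos
      else
        match pvSkipLe starts e with
        | [] => ([], [])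
        | s :: starts' =>
          let r := pvBLoop tags rest (s :: starts') (s + 1)
          if e + 1 < s then
            (PySem.List.slice tags (some ((e : Int) + 1)) (some (s : Int)) :: r.1,
              ((e : Int) + 1, (s : Int)) :: r.2)
          else r := rfl

theorem pvStarts_sorted (tags : List String) : (pvStarts tags).Pairwise (· < ·) :=
  (List.pairwise_lt_range).filter _

theorem pvEnds_sorted (tags : List String) : (pvEnds tags).Pairwise (· < ·) :=
  (List.pairwise_lt_range).filter _

theorem mem_pvStarts (tags : List String) (i : Nat) :
    i ∈ pvStarts tags ↔ i < tags.length ∧ PySem.Str.startswith (tags.getD i "") "!START_OF_DEL_ALLELE!" := by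
  simp [pvStarts, List.mem_filter, List.mem_range]

theorem mem_pvEnds (tags : List String) (i : Nat) :
    i ∈ pvEnds tags ↔ i < tags.length - 1 ∧ PySem.Str.endswith (tags.getD i "") "!END_OF_DEL_ALLELE!" := by
  simp [pvEnds, List.mem_filter, List.mem_range]

-- filter (i ≤ ·) = filter (i+1 ≤ ·) when i is absent
theorem filter_ge_succ_of_not_mem (l : List Nat) (i : Nat) (h : i ∉ l) :
    l.filter (fun x => i ≤ x) = l.filter (fun x => i + 1 ≤ x) := by
  apply List.filter_congr
  intro x hx
  have : x ≠ i := fun he => h (he ▸ hx)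
  simp only [decide_eq_decide]
  omega

-- filter (i ≤ ·) of a sorted list containing i starts with i
theorem filter_ge_cons_of_mem (l : List Nat) (i : Nat) (hs : l.Pairwise (· < ·)) (h : i ∈ l) :
    l.filter (fun x => i ≤ x) = i :: l.filter (fun x => i + 1 ≤ x) := by
  induction l with
  | nil => cases h
  | cons a rest ih =>
    rcases List.pairwise_cons.mp hs with ⟨ha, hrest⟩
    by_cases hai : a = i
    · subst hai
      have hni : a ∉ rest := fun hm => absurd (ha a hm) (lt_irrefl a)
      have hd1 : (decide (a ≤ a)) = true := by simp
      have hd2 : (decide (a + 1 ≤ a)) ≠ true := by simp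
      rw [List.filter_cons, if_pos hd1, List.filter_cons, if_neg hd2,
        filter_ge_succ_of_not_mem rest a hni]
    · have hmem : i ∈ rest := by
        rcases List.mem_cons.mp h with h' | h'
        · exact absurd h'.symm hai
        · exact h'
      have hlt : a < i := ha i hmem
      have hd1 : (decide (i ≤ a)) ≠ true := by simp; omega
      have hd2 : (decide (i + 1 ≤ a)) ≠ true := by simp; omega
      rw [List.filter_cons, if_neg hd1, List.filter_cons, if_neg hd2]
      exact ih hrest hmem

-- skipLe on a sorted list is a filter
theorem pvSkipLe_filter (l : List Nat) (e : Nat) (hs : l.Pairwise (· < ·)) :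
    pvSkipLe l e = l.filter (fun x => e + 1 ≤ x) := by
  induction l with
  | nil => rfl
  | cons a rest ih =>
    rcases List.pairwise_cons.mp hs with ⟨ha, hrest⟩
    rw [pvSkipLe_cons]
    by_cases h : a ≤ e
    · have hd : (decide (e + 1 ≤ a)) ≠ true := by simp; omega
      rw [if_pos h, ih hrest, List.filter_cons, if_neg hd]
    · have hd : (decide (e + 1 ≤ a)) = true := by simp; omega
      have h2 : rest.filter (fun x => e + 1 ≤ x) = rest := by
        apply List.filter_eq_self.mpr
        intro x hx
        have := ha x hx
        simp; omega
      rw [if_neg h, List.filter_cons, if_pos hd, h2]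

-- pvBLoop ignores already-passed ends: a lower filter bound can be raised to pos
theorem pvBLoop_filter (tags : List String) :
    ∀ (l : List Nat) (starts : List Nat) (p q : Nat), q ≤ p →
      pvBLoop tags (l.filter (fun e => q ≤ e)) starts p =
        pvBLoop tags (l.filter (fun e => p ≤ e)) starts p := by
  intro l
  induction l with
  | nil => intro starts p q _; rfl
  | cons a rest ih =>
    intro starts p q hqp
    by_cases hq : q ≤ a
    · by_cases hp : p ≤ a
      · have h1 : (decide (q ≤ a)) = true := by simp; omega
        have h2 : (decide (p ≤ a)) = true := by simp; omega
        rw [List.filter_cons, if_pos h1, List.filter_cons, if_pos h2,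
          pvBLoop_cons, pvBLoop_cons]
        have hna : ¬ a < p := by omega
        rw [if_neg hna, if_neg hna]
        cases hsk : pvSkipLe starts a with
        | nil => rfl
        | cons s starts' =>
          have hgt : a < s := pvSkipLe_head_gt starts a s starts' hsk
          simp only []
          rw [ih (s :: starts') (s + 1) q (by omega), ih (s :: starts') (s + 1) p (by omega)]
      · -- q ≤ a < p : kept by the q-filter but skipped; dropped by the p-filter
        have h1 : (decide (q ≤ a)) = true := by simp; omega
        have h2 : (decide (p ≤ a)) ≠ true := by simp; omega
        have h3 : a < p := by omega
        rw [List.filter_cons, if_pos h1, List.filter_cons, if_neg h2, pvBLoop_cons, if_pos h3]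
        exact ih starts p q hqp
    · have h1 : (decide (q ≤ a)) ≠ true := by simp; omega
      have h2 : (decide (p ≤ a)) ≠ true := by simp; omega
      rw [List.filter_cons, if_neg h1, List.filter_cons, if_neg h2]
      exact ih starts p q hqp

-- the initial pos is irrelevant when no end precedes either candidate
theorem pvBLoop_congr_pos (tags : List String) (ends starts : List Nat) (p p' : Nat)
    (hp : ∀ e ∈ ends, p ≤ e) (hp' : ∀ e ∈ ends, p' ≤ e) :
    pvBLoop tags ends starts p = pvBLoop tags ends starts p' := by
  cases ends with
  | nil => rfl
  | cons e rest =>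
    have h1 : ¬ e < p := by have := hp e (List.mem_cons_self); omega
    have h2 : ¬ e < p' := by have := hp' e (List.mem_cons_self); omega
    rw [pvBLoop_cons, pvBLoop_cons, if_neg h1, if_neg h2]

-- characterisation of A's inner loop via the start-position list
theorem pvInnerA_char (tags : List String) :
    ∀ m k, tags.length - k ≤ m → k ≤ tags.length →
      pvInnerA tags k =
        match (pvStarts tags).filter (fun s => k ≤ s) with
        | [] => (tags.drop k, tags.length, false)
        | s :: _ => ((tags.drop k).take (s - k), s, true) := by
  intro m
  induction m with
  | zero =>
    intro k hm hk
    have hkn : k = tags.length := by omega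
    subst hkn
    have hfil : (pvStarts tags).filter (fun s => tags.length ≤ s) = [] := by
      apply List.filter_eq_nil_iff.mpr
      intro s hs
      have := (mem_pvStarts tags s).mp hs
      simp; omega
    rw [pvInnerA, hfil]
    simp
  | succ m ih =>
    intro k hm hk
    by_cases hkn : k < tags.length
    · rw [pvInnerA]
      simp only [dif_pos hkn]
      by_cases hst : PySem.Str.startswith tags[k] "!START_OF_DEL_ALLELE!"
      · have hkmem : k ∈ pvStarts tags := by
          rw [mem_pvStarts]
          refine ⟨hkn, ?_⟩
          rwa [List.getD_eq_getElem tags "" hkn]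
        rw [filter_ge_cons_of_mem _ _ (pvStarts_sorted tags) hkmem, if_pos hst]
        simp
      · have hknm : k ∉ pvStarts tags := by
          rw [mem_pvStarts]
          rw [List.getD_eq_getElem tags "" hkn]
          tauto
        rw [filter_ge_succ_of_not_mem _ _ hknm]
        have hdrop : tags.drop k = tags[k] :: tags.drop (k + 1) := List.drop_eq_getElem_cons hkn
        rw [if_neg hst, ih (k + 1) (by omega) (by omega)]
        cases hfil : (pvStarts tags).filter (fun s => k + 1 ≤ s) with
        | nil => rw [hdrop]
        | cons s rest =>
          have hsk : k + 1 ≤ s := by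
            have : s ∈ (pvStarts tags).filter (fun s => k + 1 ≤ s) := by rw [hfil]; exact List.mem_cons_self
            have := List.of_mem_filter this
            simpa using this
          simp only []
          rw [hdrop]
          have htake : (tags[k] :: tags.drop (k + 1)).take (s - k) = tags[k] :: (tags.drop (k + 1)).take (s - (k + 1)) := by
            have hs : s - k = (s - (k + 1)) + 1 := by omega
            rw [hs, List.take_succ_cons]
          rw [htake]
    · have hkn' : k = tags.length := by omega
      subst hkn'
      have hfil : (pvStarts tags).filter (fun s => tags.length ≤ s) = [] := by
        apply List.filter_eq_nil_iff.mpr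
        intro s hs
        have := (mem_pvStarts tags s).mp hs
        simp; omega
      rw [pvInnerA, hfil]
      simp

-- main invariant: A's outer loop from index i equals B's loop over the remaining ends
theorem pv_main (tags : List String) :
    ∀ m i b, tags.length - i ≤ m → b ≤ i →
      pvOuterA tags i =
        pvBLoop tags ((pvEnds tags).filter (fun e => i ≤ e))
          ((pvStarts tags).filter (fun s => b ≤ s)) i := by
  intro m
  induction m with
  | zero =>
    intro i b hm hb
    have hin : ¬ i < tags.length := by omega
    have hfil : (pvEnds tags).filter (fun e => i ≤ e) = [] := by
      apply List.filter_eq_nil_iff.mpr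
      intro e he
      have := (mem_pvEnds tags e).mp he
      simp; omega
    rw [pvOuterA, hfil]
    simp [hin, pvBLoop_nil]
  | succ m ih =>
    intro i b hm hb
    by_cases hin : i < tags.length
    case neg =>
      have hfil : (pvEnds tags).filter (fun e => i ≤ e) = [] := by
        apply List.filter_eq_nil_iff.mpr
        intro e he
        have := (mem_pvEnds tags e).mp he
        simp; omega
      rw [pvOuterA, hfil]
      simp [hin, pvBLoop_nil]
    case pos =>
    rw [pvOuterA]
    simp only [dif_pos hin]
    by_cases hcond : PySem.Str.endswith tags[i] "!END_OF_DEL_ALLELE!" = true ∧ i < tags.length - 1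
    · -- i is an end position
      have himem : i ∈ pvEnds tags := by
        rw [mem_pvEnds]
        refine ⟨hcond.2, ?_⟩
        rw [List.getD_eq_getElem tags "" hin]
        exact hcond.1
      rw [if_pos hcond]
      rw [filter_ge_cons_of_mem _ _ (pvEnds_sorted tags) himem]
      rw [pvBLoop_cons]
      have hni : ¬ i < i := lt_irrefl i
      rw [if_neg hni]
      have hsk : pvSkipLe ((pvStarts tags).filter (fun s => b ≤ s)) i
          = (pvStarts tags).filter (fun s => i + 1 ≤ s) := by
        rw [pvSkipLe_filter _ _ ((pvStarts_sorted tags).filter _)]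
        rw [List.filter_filter]
        apply List.filter_congr
        intro x hx
        by_cases hx1 : i + 1 ≤ x
        · simp [hx1, show b ≤ x by omega]
        · simp [hx1]
      rw [hsk]
      rw [pvInnerA_char tags (tags.length - (i + 1)) (i + 1) (by omega) (by omega)]
      cases hfil : (pvStarts tags).filter (fun s => i + 1 ≤ s) with
      | nil =>
        -- no START after i: A consumes the rest without recording; B stops
        have houter : pvOuterA tags (tags.length + 1) = ([], []) := by
          rw [pvOuterA]
          have : ¬ tags.length + 1 < tags.length := by omega
          simp [this]
        simp [houter]
      | cons s starts' =>
        have hsmem : s ∈ pvStarts tags := by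
          have : s ∈ (pvStarts tags).filter (fun s => i + 1 ≤ s) := by rw [hfil]; exact List.mem_cons_self
          exact List.mem_of_mem_filter this
        have hsn : s < tags.length := ((mem_pvStarts tags s).mp hsmem).1
        have hsi : i + 1 ≤ s := by
          have : s ∈ (pvStarts tags).filter (fun s => i + 1 ≤ s) := by rw [hfil]; exact List.mem_cons_self
          simpa using List.of_mem_filter this
        simp only []
        -- rest of A = rest of B via IH and the filter-raising lemma
        have hrest : pvOuterA tags (s + 1) =
            pvBLoop tags ((pvEnds tags).filter (fun e => i + 1 ≤ e)) (s :: starts') (s + 1) := by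
          rw [ih (s + 1) (i + 1) (by omega) (by omega), ← hfil]
          exact (pvBLoop_filter tags (pvEnds tags) _ (s + 1) (i + 1) (by omega)).symm
        rw [hrest]
        -- the record condition and the recorded values coincide
        by_cases hgap : i + 1 < s
        · have hne : (tags.drop (i + 1)).take (s - (i + 1)) ≠ [] := by
            have hlen : (tags.drop (i + 1)).length = tags.length - (i + 1) := List.length_drop ..
            intro hnil
            have := congrArg List.length hnil
            rw [List.length_take, hlen] at this
            simp at this
            omega
          rw [if_pos ⟨hne, trivial⟩, if_pos hgap]
          have hslice : PySem.List.slice tags (some ((i : Int) + 1)) (some (s : Int))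
              = (tags.drop (i + 1)).take (s - (i + 1)) := by
            have h1 : ((i : Int) + 1) = ((i + 1 : Nat) : Int) := by push_cast; ring
            rw [h1, PySem.List.slice_natCast]
          rw [hslice]
          have hidx : ((i + 1 : Nat) : Int) = (i : Int) + 1 := by push_cast; ring
          rw [hidx]
        · have hs1 : s = i + 1 := by omega
          have hnil : (tags.drop (i + 1)).take (s - (i + 1)) = [] := by
            rw [hs1]; simp
          rw [if_neg (by simp [hnil]), if_neg hgap]
    · -- i is not an end position: both sides just move on
      rw [if_neg hcond]
      have hnim : i ∉ pvEnds tags := by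
        rw [mem_pvEnds]
        rw [List.getD_eq_getElem tags "" hin]
        tauto
      rw [filter_ge_succ_of_not_mem _ _ hnim]
      rw [ih (i + 1) b (by omega) (by omega)]
      apply pvBLoop_congr_pos
      · intro e he
        have := List.of_mem_filter he
        simp at this
        omega
      · intro e he
        have := List.of_mem_filter he
        simp at this
        omega

-- ===== VERDICT (by name: the statement is the Claim_ definition above) =====
theorem get_flanked_tags_by_deletions_spec : Claim_equal_get_flanked_tags_by_deletions := by
  intro midsv_tags _
  unfold Spec_get_flanked_tags_by_deletions get_flanked_tags_by_deletions get_flanked_tags_by_deletions_alt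
  have h := pv_main midsv_tags midsv_tags.length 0 0 (by omega) (le_refl 0)
  rw [h]
  congr 1
  · apply List.filter_eq_self.mpr; intro x _; simp
  · apply List.filter_eq_self.mpr; intro x _; simp
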